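-- pv_equiv track=rewrite | github.com/martyman798-netizen/warehouse-project | strategy.py | _build_coverage_tiles
-- ===== SOURCE A (Python) =====
-- def _build_coverage_tiles(map_w: int, map_h: int, vw: int = 15, vh: int = 15) -> list[tuple[int, int, int, int]]:
--     """
--     Return a minimal set of (x, y, w, h) viewports that tiles the full map.
--     Tiles are placed greedily left-to-right, top-to-bottom.
--     The last tile in each row/column may be narrower/shorter.
--     """
--     tiles = []
--     y = 0
--     while y < map_h:
--         actual_h = min(vh, map_h - y)
--         x = 0
--         while x < map_w:
--             actual_w = min(vw, map_w - x)
--             tiles.append((x, y, actual_w, actual_h))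
--             x += vw
--         y += vh
--     return tiles
-- ===== SOURCE B (Python) =====
-- def _build_coverage_tiles(map_w: int, map_h: int, vw: int = 15, vh: int = 15) -> list[tuple[int, int, int, int]]:
--     """Single flat pass: number the tiles 0..nrows*ncols-1 and recover each
--     tile's grid cell by divmod, clamping the last column/row on the fly."""
--     if map_w <= 0 or map_h <= 0:
--         return []
--     ncols = -(-map_w // vw)
--     nrows = -(-map_h // vh)
--     tiles = []
--     for i in range(nrows * ncols):
--         r, c = divmod(i, ncols)
--         x = c * vw
--         y = r * vh
--         tiles.append((x, y, min(vw, map_w - x), min(vh, map_h - y)))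
--     return tiles
-- ===== Notes on version B (the rewrite author's own statement) =====
-- stated objective: alternative
-- what changed: Replaced the nested while loops by one flat loop over tile indices 0..nrows*ncols-1 that recovers each tile's grid cell with divmod from precomputed ceiling-division counts, instead of stepping x and y cursors.
import Mathlib
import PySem

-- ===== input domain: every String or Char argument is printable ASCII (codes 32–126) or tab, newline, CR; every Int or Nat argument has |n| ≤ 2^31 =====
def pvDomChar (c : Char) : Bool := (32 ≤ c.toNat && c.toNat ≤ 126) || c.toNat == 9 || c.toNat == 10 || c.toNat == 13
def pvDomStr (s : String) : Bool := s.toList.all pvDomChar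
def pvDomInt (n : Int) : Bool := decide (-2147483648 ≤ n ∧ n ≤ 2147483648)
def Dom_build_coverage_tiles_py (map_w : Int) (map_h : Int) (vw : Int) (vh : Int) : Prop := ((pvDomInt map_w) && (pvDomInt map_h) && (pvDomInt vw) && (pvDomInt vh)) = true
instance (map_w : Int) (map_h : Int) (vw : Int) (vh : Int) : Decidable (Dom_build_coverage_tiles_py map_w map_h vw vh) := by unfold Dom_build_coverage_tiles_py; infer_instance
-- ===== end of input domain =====

-- B replaces A's nested x/y-cursor while loops by one flat loop over tile indices
-- 0..nrows*ncols-1 with divmod recovering each grid cell (objective: alternative).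

-- ===== PORT A =====
-- inner while loop of A ('while x < map_w'); the 'else []' on vw ≤ 0 only totalizes the
-- recursion: Python's loop does not terminate there, and Pre_ excludes those inputs.
def pvInnerA (map_w : Int) (vw : Int) (y : Int) (h : Int) (x : Int) : List (Int × Int × Int × Int) :=
  if _hx : x < map_w then
    if _hv : 0 < vw then
      (x, y, min vw (map_w - x), h) :: pvInnerA map_w vw y h (x + vw)
    else []
  else []
termination_by (map_w - x).toNat
decreasing_by omega

-- outer while loop of A ('while y < map_h'); same totalizing guard for vh ≤ 0.
def pvOuterA (map_w : Int) (map_h : Int) (vw : Int) (vh : Int) (y : Int) : List (Int × Int × Int × Int) :=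
  if _hy : y < map_h then
    if _hv : 0 < vh then
      pvInnerA map_w vw y (min vh (map_h - y)) 0 ++ pvOuterA map_w map_h vw vh (y + vh)
    else []
  else []
termination_by (map_h - y).toNat
decreasing_by omega

def build_coverage_tiles_py (map_w : Int) (map_h : Int) (vw : Int) (vh : Int) : List (Int × Int × Int × Int) :=
  pvOuterA map_w map_h vw vh 0

-- ===== PORT B =====
def build_coverage_tiles_py_alt (map_w : Int) (map_h : Int) (vw : Int) (vh : Int) : List (Int × Int × Int × Int) :=
  if map_w ≤ 0 ∨ map_h ≤ 0 then []
  else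
    let ncols := -(PySem.Int.floordiv (-map_w) vw)
    let nrows := -(PySem.Int.floordiv (-map_h) vh)
    (PySem.List.pyRange 0 (nrows * ncols) 1).map (fun i =>
      let r := PySem.Int.floordiv i ncols
      let c := PySem.Int.mod i ncols
      let x := c * vw
      let y := r * vh
      (x, y, min vw (map_w - x), min vh (map_h - y)))

-- ===== PRECONDITION & SPEC =====
-- Pre_ excludes exactly the inputs on which A's while loops never terminate: a positive
-- map_h with a non-positive vh step, or a positive map_h and map_w with a non-positive vw.
def Pre_build_coverage_tiles_py (map_w : Int) (map_h : Int) (vw : Int) (vh : Int) : Prop :=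
  map_h ≤ 0 ∨ (0 < vh ∧ (map_w ≤ 0 ∨ 0 < vw))
instance (map_w : Int) (map_h : Int) (vw : Int) (vh : Int) : Decidable (Pre_build_coverage_tiles_py map_w map_h vw vh) := by unfold Pre_build_coverage_tiles_py; infer_instance

def pvWitness_build_coverage_tiles_py : Int × Int × Int × Int := (7, 5, 3, 2)

def Spec_build_coverage_tiles_py (map_w : Int) (map_h : Int) (vw : Int) (vh : Int) (out : List (Int × Int × Int × Int)) : Prop := out = build_coverage_tiles_py_alt map_w map_h vw vh
instance (map_w : Int) (map_h : Int) (vw : Int) (vh : Int) (out : List (Int × Int × Int × Int)) : Decidable (Spec_build_coverage_tiles_py map_w map_h vw vh out) := by unfold Spec_build_coverage_tiles_py; infer_instance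

-- ===== CLAIM (what is proved, stated in full; the proofs are below) =====
def Claim_equal_build_coverage_tiles_py : Prop := ∀ (map_w : Int) (map_h : Int) (vw : Int) (vh : Int), Dom_build_coverage_tiles_py map_w map_h vw vh → Pre_build_coverage_tiles_py map_w map_h vw vh → Spec_build_coverage_tiles_py map_w map_h vw vh (build_coverage_tiles_py map_w map_h vw vh)

-- ===== LEMMAS AND PROOFS =====

-- unfolding a positive-step pyRange one element at a time (no cons form for general step is in the prelude)
theorem pvRange_pos_cons (a b : Int) {s : Int} (hs : 0 < s) (hab : a < b) :
    PySem.List.pyRange a b s = a :: PySem.List.pyRange (a + s) b s := by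
  rw [PySem.List.pyRange_of_pos a b hs, PySem.List.pyRange_of_pos (a + s) b hs]
  have hn1 : b - a + s - 1 = (b - a - 1) + 1 * s := by ring
  have hdiv : (b - a + s - 1) / s = (b - a - 1) / s + 1 := by
    rw [hn1, Int.add_mul_ediv_right _ _ (by omega : s ≠ 0)]
  by_cases hab' : a + s < b
  · have hn2 : b - (a + s) + s - 1 = b - a - 1 := by ring
    have h0 : 0 ≤ (b - a - 1) / s := Int.ediv_nonneg (by omega) (by omega)
    rw [if_pos hab, if_pos hab', hn2, hdiv]
    have : ((b - a - 1) / s + 1).toNat = ((b - a - 1) / s).toNat + 1 := by omega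
    rw [this, List.range_succ_eq_map]
    simp only [List.map_cons, List.map_map]
    refine List.cons_eq_cons.mpr ⟨by push_cast; ring, ?_⟩
    apply List.map_congr_left
    intro k _
    simp only [Function.comp, Nat.succ_eq_add_one]
    push_cast; ring
  · have hz : (b - a - 1) / s = 0 := by
      apply Int.ediv_eq_zero_of_lt (by omega) (by omega)
    rw [if_pos hab, if_neg hab', hdiv, hz]
    simp

theorem pvRange_pos_nil (a b : Int) {s : Int} (hs : 0 < s) (hab : ¬ a < b) :
    PySem.List.pyRange a b s = [] := by
  rw [PySem.List.pyRange_of_pos a b hs, if_neg hab]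
  simp

theorem pvInnerA_eq (map_w vw y h : Int) (hv : 0 < vw) (x : Int) :
    pvInnerA map_w vw y h x =
      (PySem.List.pyRange x map_w vw).map (fun x' => (x', y, min vw (map_w - x'), h)) := by
  fun_induction pvInnerA map_w vw y h x with
  | case1 x hx _ ih =>
      rw [pvRange_pos_cons x map_w hv hx, List.map_cons, ih]
  | case2 x hx hv' => omega
  | case3 x hx =>
      rw [pvRange_pos_nil x map_w hv hx]
      simp

theorem pvOuterA_eq (map_w map_h vw vh : Int) (hv : 0 < vh) (y : Int) :
    pvOuterA map_w map_h vw vh y =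
      (PySem.List.pyRange y map_h vh).flatMap
        (fun y' => pvInnerA map_w vw y' (min vh (map_h - y')) 0) := by
  fun_induction pvOuterA map_w map_h vw vh y with
  | case1 y hy _ ih =>
      rw [pvRange_pos_cons y map_h hv hy, List.flatMap_cons, ih]
  | case2 y hy hv' => omega
  | case3 y hy =>
      rw [pvRange_pos_nil y map_h hv hy]
      simp

-- B's ceiling count -(-w // s) equals pyRange's count (w + s - 1) / s, and is positive
theorem pvCeilCount (w s : Int) (hs : 0 < s) (hw : 0 < w) :
    -(PySem.Int.floordiv (-w) s) = (w + s - 1) / s ∧ 0 < (w + s - 1) / s := by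
  have hdm := Int.mul_ediv_add_emod (w + s - 1) s
  have h0 := Int.emod_nonneg (w + s - 1) (by omega : s ≠ 0)
  have h1 := Int.emod_lt_of_pos (w + s - 1) hs
  set e := (w + s - 1) / s with he
  have hub : w ≤ e * s := by nlinarith
  have hlb : (e - 1) * s < w := by nlinarith
  have hepos : 0 < e := by nlinarith
  exact ⟨(PySem.Int.neg_floordiv_neg_eq_iff_of_pos hs).mpr ⟨hlb, hub⟩, hepos⟩

-- flat index enumeration of an n × m grid equals row-major nested enumeration
theorem pvRangeMulFlat {α : Type} (g : Nat → Nat → α) (m : Nat) (hm : 0 < m) (n : Nat) :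
    (List.range (n * m)).map (fun k => g (k / m) (k % m)) =
      (List.range n).flatMap (fun r => (List.range m).map (fun c => g r c)) := by
  induction n with
  | zero => simp
  | succ n ih =>
      rw [Nat.succ_mul, List.range_add, List.map_append, ih, List.range_succ,
        List.flatMap_append, List.map_map]
      congr 1
      simp only [List.flatMap_cons, List.flatMap_nil, List.append_nil]
      apply List.map_congr_left
      intro j hj
      have hjm : j < m := List.mem_range.mp hj
      have hd : (n * m + j) / m = n := by
        rw [Nat.add_comm, Nat.add_mul_div_right _ _ hm, Nat.div_eq_of_lt hjm]
        omega
      have hmo : (n * m + j) % m = j := by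
        rw [Nat.add_comm, Nat.add_mul_mod_self_right, Nat.mod_eq_of_lt hjm]
      simp [Function.comp, hd, hmo]

-- ===== VERDICT (by name: the statement is the Claim_ definition above) =====
theorem build_coverage_tiles_py_spec : Claim_equal_build_coverage_tiles_py := by
  intro map_w map_h vw vh _ hpre
  unfold Spec_build_coverage_tiles_py build_coverage_tiles_py build_coverage_tiles_py_alt
  by_cases hh : map_h ≤ 0
  · rw [pvOuterA, dif_neg (by omega : ¬ (0:Int) < map_h)]
    simp [hh]
  · have hvh : 0 < vh := by
      rcases hpre with h | ⟨h1, _⟩; · omega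
      · exact h1
    by_cases hw : map_w ≤ 0
    · rw [if_pos (Or.inl hw), pvOuterA_eq map_w map_h vw vh hvh 0]
      apply List.flatMap_eq_nil_iff.mpr
      intro y' _
      rw [pvInnerA, dif_neg (by omega : ¬ (0:Int) < map_w)]
    · have hvw : 0 < vw := by
        rcases hpre with h | ⟨_, h2 | h2⟩ <;> omega
      obtain ⟨hW, hWpos⟩ := pvCeilCount map_w vw hvw (by omega)
      obtain ⟨hH, hHpos⟩ := pvCeilCount map_h vh hvh (by omega)
      set Kw : Nat := ((map_w + vw - 1) / vw).toNat with hKwdef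
      set Kh : Nat := ((map_h + vh - 1) / vh).toNat with hKhdef
      have hKw : ((map_w + vw - 1) / vw) = (Kw : Int) := by omega
      have hKh : ((map_h + vh - 1) / vh) = (Kh : Int) := by omega
      -- reduce B (RHS) to a flat map over List.range (Kh * Kw)
      rw [if_neg (by omega)]
      simp only [hW, hH, hKw, hKh, ← Nat.cast_mul, PySem.List.pyRange_one]
      rw [show ((((Kh * Kw : Nat) : Int)) - 0).toNat = Kh * Kw by omega]
      rw [List.map_map]
      have hBfun : ((fun i =>
            ((PySem.Int.mod i (Kw : Int)) * vw, (PySem.Int.floordiv i (Kw : Int)) * vh,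
             min vw (map_w - (PySem.Int.mod i (Kw : Int)) * vw),
             min vh (map_h - (PySem.Int.floordiv i (Kw : Int)) * vh))) ∘ (fun k : Nat => (0 : Int) + k)) =
          fun k : Nat => (((k % Kw : Nat) : Int) * vw, ((k / Kw : Nat) : Int) * vh,
             min vw (map_w - ((k % Kw : Nat) : Int) * vw),
             min vh (map_h - ((k / Kw : Nat) : Int) * vh)) := by
        funext k
        simp [Function.comp, PySem.Int.floordiv_natCast, PySem.Int.mod_natCast]
      rw [hBfun,
        pvRangeMulFlat (fun r c => (((c : Nat) : Int) * vw, ((r : Nat) : Int) * vh,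
          min vw (map_w - ((c : Nat) : Int) * vw), min vh (map_h - ((r : Nat) : Int) * vh)))
          Kw (by omega) Kh]
      -- reduce A (LHS) to the same nested flatMap
      rw [pvOuterA_eq map_w map_h vw vh hvh 0, PySem.List.pyRange_of_pos 0 map_h hvh,
        if_pos (by omega : (0:Int) < map_h),
        show map_h - 0 + vh - 1 = map_h + vh - 1 from by ring, hKh, Int.toNat_natCast,
        List.flatMap_map]
      congr 1
      funext r
      simp only [zero_add]
      rw [pvInnerA_eq map_w vw _ _ hvw 0, PySem.List.pyRange_of_pos 0 map_w hvw,
        if_pos (by omega : (0:Int) < map_w),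
        show map_w - 0 + vw - 1 = map_w + vw - 1 from by ring, hKw, Int.toNat_natCast,
        List.map_map]
      congr 1
      funext c
      simp [Int.mul_comm]
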